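-- pv_equiv track=rewrite | github.com/Ahngyuho/JavaCodingTest | 알고리즘퍼즐68_예제파일/q45_02.py | search
-- ===== SOURCE A (Python) =====
-- N = 4
--
-- def search(rows):
--   # 모든 행을 탐색하면 종료
--   if len(rows) == N:
--     return 1
--
--   count = 0
--   for row in range(0, 2 ** N):
--     #네 모서리에○과×가 교대로 되어 있는지 확인
--     cross = filter(lambda r: (row & ~r) > 0 and (~row & r) > 0, rows)
--     cross = list(cross)
--     if len(cross) == 0:
--       count += search(rows + [row])
--   return count
-- ===== SOURCE B (Python) =====
-- N = 4
--
-- def comparable(a, b):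
--     return not ((a & ~b) > 0 and (~a & b) > 0)
--
-- def search(rows):
--     if len(rows) == N:
--         return 1
--     m = N - len(rows)
--     # enumerate every completion (tuple of m values in 0..15) flatly, then test it
--     tuples = [[]]
--     for _ in range(m):
--         tuples = [[v] + t for v in range(16) for t in tuples]
--     count = 0
--     for t in tuples:
--         if all(comparable(a, b) for i, a in enumerate(t) for b in rows + t[:i]):
--             count += 1
--     return count
-- ===== Notes on version B (the rewrite author's own statement) =====
-- stated objective: alternative
-- what changed: Replaces the pruned depth-first recursion by a flat two-phase pass: iteratively build the full list of 16^(N-len(rows)) candidate completions, then count those whose every new value is comparable to all given rows and all earlier new values.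
-- outside the precondition, e.g. on search([0, 0, 0, 0, 0]): A does not finish within the time limit, B returns 1
import Mathlib
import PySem

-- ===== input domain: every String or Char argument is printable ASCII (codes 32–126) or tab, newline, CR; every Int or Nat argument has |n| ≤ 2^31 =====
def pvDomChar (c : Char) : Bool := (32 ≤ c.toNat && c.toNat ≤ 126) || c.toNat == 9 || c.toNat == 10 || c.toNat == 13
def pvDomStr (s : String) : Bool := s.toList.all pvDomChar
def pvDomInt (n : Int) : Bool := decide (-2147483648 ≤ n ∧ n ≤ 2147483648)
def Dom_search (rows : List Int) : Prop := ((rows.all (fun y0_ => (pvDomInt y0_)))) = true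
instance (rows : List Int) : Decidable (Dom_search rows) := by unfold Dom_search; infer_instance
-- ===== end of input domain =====

-- B replaces A's pruned depth-first recursion by flatly enumerating all 16^(4-len) completions and
-- testing each one; equal counts are proved on Pre_search (len(rows) ≤ 4, where A terminates).

-- ===== PORT A =====
-- fuel makes A's recursion total; on Pre_search the fuel 4 - len(rows) + 1 is never exhausted
def searchGo : Nat → List Int → Int
  | 0, _ => 0
  | fuel+1, rows =>
    if rows.length = 4 then 1
    else
      (PySem.List.pyRange 0 (2^4) 1).foldl (fun count row =>
        if (rows.filter (fun r =>
              decide (PySem.Int.band row (Int.not r) > 0) &&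
              decide (PySem.Int.band (Int.not row) r > 0))).length = 0
        then count + searchGo fuel (rows ++ [row])
        else count) 0

def search (rows : List Int) : Int := searchGo (4 - rows.length + 1) rows

-- ===== PORT B =====
def comparableB (a b : Int) : Bool :=
  !(decide (PySem.Int.band a (Int.not b) > 0) && decide (PySem.Int.band (Int.not a) b > 0))

def search_alt (rows : List Int) : Int :=
  if rows.length = 4 then 1
  else
    let tuples := (PySem.List.pyRange 0 (4 - (rows.length : Int)) 1).foldl
      (fun ts _ => (PySem.List.pyRange 0 16 1).flatMap (fun v => ts.map (fun t => v :: t))) [[]]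
    tuples.foldl (fun count t =>
      if (PySem.List.enumerate t 0).all (fun p =>
            (rows ++ PySem.List.slice t none (some p.1)).all (fun b => comparableB p.2 b))
      then count + 1 else count) 0

-- ===== PRECONDITION & SPEC =====
-- Pre_ excludes rows longer than N = 4, on which A recurses without bound (RecursionError)
def Pre_search (rows : List Int) : Prop := rows.length ≤ 4
instance (rows : List Int) : Decidable (Pre_search rows) := by unfold Pre_search; infer_instance
def pvWitness_search : List Int := ([3])

def Spec_search (rows : List Int) (out : Int) : Prop := out = search_alt rows
instance (rows : List Int) (out : Int) : Decidable (Spec_search rows out) := by unfold Spec_search; infer_instance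

-- ===== CLAIM (what is proved, stated in full; the proofs are below) =====
def Claim_equal_search : Prop := ∀ (rows : List Int), Dom_search rows → Pre_search rows → Spec_search rows (search rows)

-- ===== LEMMAS AND PROOFS =====

def consT : Nat → List (List Int)
  | 0 => [[]]
  | k+1 => (PySem.List.pyRange 0 16 1).flatMap (fun v => (consT k).map (v :: ·))

def validN : List Int → List Int → Bool
  | _, [] => true
  | rows, v :: t => rows.all (fun b => comparableB v b) && validN (rows ++ [v]) t

lemma foldl_const_iterate {α β : Type} (f : α → α) (l : List β) (init : α) :
    l.foldl (fun a _ => f a) init = f^[l.length] init := by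
  induction l generalizing init with
  | nil => rfl
  | cons x xs ih => simp [List.foldl_cons, ih, Function.iterate_succ_apply]

lemma tuples_eq_consT (m : Nat) :
    (PySem.List.pyRange 0 (m : Int) 1).foldl
      (fun ts _ => (PySem.List.pyRange 0 16 1).flatMap (fun v => ts.map (fun t => v :: t))) [[]]
    = consT m := by
  have hl : (PySem.List.pyRange 0 (m : Int) 1).length = m := by
    simp [PySem.List.length_pyRange_one]
  have hit : ∀ n : Nat,
      (fun ts => (PySem.List.pyRange 0 16 1).flatMap (fun v => ts.map (fun t => v :: t)))^[n] [[]]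
      = consT n := by
    intro n
    induction n with
    | zero => rfl
    | succ k ih => rw [Function.iterate_succ_apply', ih]; rfl
  rw [foldl_const_iterate, hl, hit]

lemma foldl_if_add {α : Type} (l : List α) (p : α → Prop) [DecidablePred p] (f : α → Int) (c : Int) :
    l.foldl (fun acc x => if p x then acc + f x else acc) c
    = c + (l.map (fun x => if p x then f x else 0)).sum := by
  induction l generalizing c with
  | nil => simp
  | cons x xs ih =>
    simp only [List.foldl_cons, List.map_cons, List.sum_cons, ih]
    by_cases h : p x
    · simp [h]; ring
    · simp [h]

lemma sum_flatMap_int {α : Type} (l : List α) (f : α → List Int) :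
    (l.flatMap f).sum = (l.map (fun v => (f v).sum)).sum := by
  induction l with
  | nil => rfl
  | cons x xs ih => simp [List.flatMap_cons, ih]

lemma validB_aux (t : List Int) : ∀ (pre rows : List Int),
    ((PySem.List.enumerate t (pre.length : Int)).all (fun p =>
        (rows ++ PySem.List.slice (pre ++ t) none (some p.1)).all (fun b => comparableB p.2 b)))
    = validN (rows ++ pre) t := by
  induction t with
  | nil => intro pre rows; simp [PySem.List.enumerate, validN]
  | cons v t ih =>
    intro pre rows
    rw [PySem.List.enumerate_cons, List.all_cons]
    have h0 : PySem.List.slice (pre ++ v :: t) none (some (pre.length : Int)) = pre := by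
      rw [PySem.List.slice_to_natCast]
      simp
    rw [h0]
    have h2 : pre ++ v :: t = (pre ++ [v]) ++ t := by simp
    rw [h2]
    have h1 : ((pre.length : Int) + 1) = (((pre ++ [v]).length : Nat) : Int) := by simp
    rw [h1, ih (pre ++ [v]) rows]
    rw [show rows ++ (pre ++ [v]) = (rows ++ pre) ++ [v] from by simp]
    rfl

lemma validB_eq_validN (t rows : List Int) :
    ((PySem.List.enumerate t 0).all (fun p =>
        (rows ++ PySem.List.slice t none (some p.1)).all (fun b => comparableB p.2 b)))
    = validN rows t := by
  have := validB_aux t [] rows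
  simpa using this

lemma filter_len_zero_iff (rows : List Int) (row : Int) :
    ((rows.filter (fun r =>
        decide (PySem.Int.band row (Int.not r) > 0) &&
        decide (PySem.Int.band (Int.not row) r > 0))).length = 0)
    ↔ (rows.all (fun b => comparableB row b) = true) := by
  rw [List.length_eq_zero_iff, List.filter_eq_nil_iff, List.all_eq_true]
  apply forall_congr'
  intro b
  apply imp_congr_right
  intro _
  simp [comparableB]
  omega

lemma main_lemma (m : Nat) : ∀ (rows : List Int), rows.length + m = 4 →
    searchGo (m+1) rows
    = ((consT m).map (fun t => if validN rows t then (1:Int) else 0)).sum := by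
  induction m with
  | zero =>
    intro rows h
    have h4 : rows.length = 4 := by omega
    simp [searchGo, h4, consT, validN]
  | succ k ih =>
    intro rows h
    have hne : ¬ rows.length = 4 := by omega
    show searchGo (k+1+1) rows = _
    rw [searchGo]
    rw [if_neg hne]
    rw [foldl_if_add (PySem.List.pyRange 0 (2^4) 1)
          (fun row => (rows.filter (fun r =>
              decide (PySem.Int.band row (Int.not r) > 0) &&
              decide (PySem.Int.band (Int.not row) r > 0))).length = 0)
          (fun row => searchGo (k+1) (rows ++ [row])) 0]
    rw [show consT (k+1)
        = (PySem.List.pyRange 0 16 1).flatMap (fun v => (consT k).map (v :: ·)) from rfl]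
    rw [List.map_flatMap, sum_flatMap_int]
    rw [zero_add]
    apply congrArg
    apply List.map_congr_left
    intro v _
    rw [List.map_map]
    by_cases hc : rows.all (fun b => comparableB v b) = true
    · rw [if_pos ((filter_len_zero_iff rows v).mpr hc)]
      rw [ih (rows ++ [v]) (by simp; omega)]
      apply congrArg
      apply List.map_congr_left
      intro t _
      show (if validN (rows ++ [v]) t then (1:Int) else 0)
          = if validN rows (v :: t) then (1:Int) else 0
      have : validN rows (v :: t) = ((rows.all fun b => comparableB v b) && validN (rows ++ [v]) t) := rfl
      rw [this, hc, Bool.true_and]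
    · rw [if_neg (fun hh => hc ((filter_len_zero_iff rows v).mp hh))]
      have : ∀ t ∈ consT k, ((fun t => if validN rows t then (1:Int) else 0) ∘ (v :: ·)) t = 0 := by
        intro t _
        show (if validN rows (v :: t) then (1:Int) else 0) = 0
        have hv : validN rows (v :: t) = ((rows.all fun b => comparableB v b) && validN (rows ++ [v]) t) := rfl
        rw [hv]
        simp [Bool.eq_false_iff.mpr hc]
      rw [List.map_congr_left this]
      simp

-- ===== VERDICT (by name: the statement is the Claim_ definition above) =====
theorem search_spec : Claim_equal_search := by
  intro rows _ hpre
  unfold Spec_search search search_alt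
  by_cases h4 : rows.length = 4
  · rw [if_pos h4]
    have : (4 : Nat) - rows.length + 1 = 1 := by omega
    rw [this]
    simp [searchGo, h4]
  · rw [if_neg h4]
    have hm : rows.length + (4 - rows.length) = 4 := by
      unfold Pre_search at hpre; omega
    have hcast : ((4:Int) - (rows.length : Int)) = ((4 - rows.length : Nat) : Int) := by
      unfold Pre_search at hpre; omega
    rw [hcast, tuples_eq_consT]
    have hfuel : (4 : Nat) - rows.length + 1 = (4 - rows.length) + 1 := rfl
    rw [main_lemma (4 - rows.length) rows hm]
    rw [foldl_if_add (consT (4 - rows.length)) _ (fun _ => (1:Int)) 0]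
    rw [zero_add]
    apply congrArg
    apply List.map_congr_left
    intro t _
    rw [validB_eq_validN t rows]
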